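-- pv_equiv track=rewrite | github.com/haemin123/oss-scout | server/tools/search_feature.py | _group_by_repo
-- ===== SOURCE A (Python) =====
-- from typing import Any
--
-- def _group_by_repo(
--     search_results: list[dict[str, Any]],
-- ) -> dict[str, list[dict[str, Any]]]:
--     """Group code search results by repository full name."""
--     groups: dict[str, list[dict[str, Any]]] = {}
--     for item in search_results:
--         repo = item["repo_full_name"]
--         if repo not in groups:
--             groups[repo] = []
--         groups[repo].append(item)
--     return groups
-- ===== SOURCE B (Python) =====
-- def _group_by_repo(search_results):
--     """Group code search results by repository full name.
--
--     Two-pass strategy: collect the distinct repo names in order of first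
--     appearance, then build each group by filtering the whole list.
--     """
--     order = list(dict.fromkeys(item["repo_full_name"] for item in search_results))
--     return {repo: [item for item in search_results
--                    if item["repo_full_name"] == repo]
--             for repo in order}
-- ===== Notes on version B (the rewrite author's own statement) =====
-- stated objective: alternative
-- what changed: Replaces the single-pass dict accumulation (create-bucket-then-append per item) with a two-pass scheme: dedup the repo names in first-appearance order, then build each group as a filter of the whole list.
import Mathlib
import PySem

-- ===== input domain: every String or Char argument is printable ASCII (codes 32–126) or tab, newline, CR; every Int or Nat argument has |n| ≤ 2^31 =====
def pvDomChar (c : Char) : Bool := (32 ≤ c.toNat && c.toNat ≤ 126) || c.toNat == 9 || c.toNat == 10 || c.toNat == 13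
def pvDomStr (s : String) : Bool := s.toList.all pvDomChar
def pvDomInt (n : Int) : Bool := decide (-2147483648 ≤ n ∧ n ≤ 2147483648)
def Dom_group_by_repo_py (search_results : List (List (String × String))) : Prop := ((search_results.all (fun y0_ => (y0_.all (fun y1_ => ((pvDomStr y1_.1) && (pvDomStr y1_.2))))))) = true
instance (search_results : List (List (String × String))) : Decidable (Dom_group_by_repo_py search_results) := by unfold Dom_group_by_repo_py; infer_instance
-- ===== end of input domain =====

-- B groups by deduping the repo names first and filtering per name instead of A's single-pass
-- dict accumulation; return values agree whenever every item carries the "repo_full_name" key.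

-- shared helper: item["repo_full_name"] (total form; Pre_ guarantees the key is present)
def pvRepoOf (item : List (String × String)) : String :=
  (PySem.Dict.mk item).getD "repo_full_name" ""

-- ===== PORT A =====
-- groups = {}; for item: repo = item[...]; if repo not in groups: groups[repo] = []; groups[repo].append(item)
def group_by_repo_py (search_results : List (List (String × String))) : List (String × List (List (String × String))) :=
  (search_results.foldl
    (fun groups item =>
      let repo := pvRepoOf item
      let groups := if groups.contains repo then groups else groups.insert repo []
      groups.modify repo [] (fun l => l ++ [item]))
    PySem.Dict.empty).items

-- ===== PORT B =====
-- order = list(dict.fromkeys(…)); {repo: [item for item in search_results if key == repo] for repo in order}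
def group_by_repo_py_alt (search_results : List (List (String × String))) : List (String × List (List (String × String))) :=
  (PySem.List.dedup (search_results.map pvRepoOf)).map
    (fun repo => (repo, search_results.filter (fun item => pvRepoOf item == repo)))

-- ===== PRECONDITION & SPEC =====
-- Pre_ excludes exactly the inputs where some item lacks the "repo_full_name" key: there A raises KeyError.
def Pre_group_by_repo_py (search_results : List (List (String × String))) : Prop :=
  ∀ item ∈ search_results, (PySem.Dict.mk item).contains "repo_full_name" = true
instance (search_results : List (List (String × String))) : Decidable (Pre_group_by_repo_py search_results) := by unfold Pre_group_by_repo_py; infer_instance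
def pvWitness_group_by_repo_py : (List (List (String × String))) := ([[("repo_full_name", "octo/repo"), ("path", "a.py")]])
def Spec_group_by_repo_py (search_results : List (List (String × String))) (out : List (String × List (List (String × String)))) : Prop := out = group_by_repo_py_alt search_results
instance (search_results : List (List (String × String))) (out : List (String × List (List (String × String)))) : Decidable (Spec_group_by_repo_py search_results out) := by unfold Spec_group_by_repo_py; infer_instance

-- ===== CLAIM (what is proved, stated in full; the proofs are below) =====
def Claim_equal_group_by_repo_py : Prop := ∀ (search_results : List (List (String × String))), Dom_group_by_repo_py search_results → Pre_group_by_repo_py search_results → Spec_group_by_repo_py search_results (group_by_repo_py search_results)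

-- ===== LEMMAS AND PROOFS =====

-- A's loop body (bucket creation + append) is exactly Dict.modify with default []
theorem pv_step_eq_modify (g : PySem.Dict String (List (List (String × String))))
    (r : String) (item : List (String × String)) :
    (if g.contains r then g else g.insert r []).modify r [] (fun l => l ++ [item])
      = g.modify r [] (fun l => l ++ [item]) := by
  by_cases h : g.contains r = true
  · simp [h]
  · simp only [h, Bool.false_eq_true, if_false]
    simp only [PySem.Dict.modify]
    rw [PySem.Dict.getD_insert_self, PySem.Dict.insert_insert_self,
        PySem.Dict.getD_of_not_contains g [] (by simpa using h)]

theorem pv_fold_eq (rs : List (List (String × String))) :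
    group_by_repo_py rs
      = (rs.foldl (fun g item => g.modify (pvRepoOf item) [] (fun l => l ++ [item]))
          PySem.Dict.empty).items := by
  unfold group_by_repo_py
  congr 1
  apply PySem.List.foldl_congr_mem
  intro g item _
  exact pv_step_eq_modify g (pvRepoOf item) item

theorem group_by_repo_py_spec : Claim_equal_group_by_repo_py := by
  intro rs _ _
  unfold Spec_group_by_repo_py group_by_repo_py_alt
  rw [pv_fold_eq]
  have hkeys : (rs.foldl (fun g item => g.modify (pvRepoOf item) [] (fun l => l ++ [item]))
      PySem.Dict.empty).keys = PySem.Set.ofList (rs.map pvRepoOf) := by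
    rw [PySem.Dict.keys_foldl_modify_key rs pvRepoOf [] (fun _ x => fun l => l ++ [x])
        PySem.Dict.empty]
    simp [PySem.Dict.keys_empty, PySem.Set.update, PySem.Set.ofList, PySem.Set.empty]
  have hnodup : (rs.foldl (fun g item => g.modify (pvRepoOf item) [] (fun l => l ++ [item]))
      PySem.Dict.empty).keys.Nodup :=
    PySem.Dict.nodup_keys_foldl_modify_key rs pvRepoOf [] (fun _ x => fun l => l ++ [x])
      PySem.Dict.empty (by simp [PySem.Dict.keys_empty])
  rw [PySem.Dict.items_eq_map_keys _ hnodup [], hkeys, PySem.List.dedup_eq_ofList]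
  apply List.map_congr_left
  intro repo _
  have hfold :
      (rs.foldl (fun g item => g.modify (pvRepoOf item) [] (fun l => l ++ [item]))
        PySem.Dict.empty)
      = ((rs.map (fun item => (pvRepoOf item, item))).foldl
          (fun d p => d.modify p.1 [] (fun l => l ++ [p.2])) PySem.Dict.empty) := by
    rw [List.foldl_map]
  rw [hfold, PySem.Dict.getD_foldl_modify_append]
  simp [PySem.Dict.getD_empty, List.filter_map, Function.comp_def]
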